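-- pv_equiv track=rewrite | github.com/KimJinSuAI/CodingTestPractice | 프로그래머스/Level4/지형 편집(실패, 이분탐색은 목표값을 알 수 있어야 한다.).py | solution
-- ===== SOURCE A (Python) =====
-- def solution(land, P, Q):
--     c = dict()
--     for i in range(len(land)):
--         for j in range(len(land)):
--             if land[i][j] in c:
--                 c[land[i][j]] += 1
--             else:
--                 c[land[i][j]] = 1
--     cKeys = sorted(c.keys())
--     left = 0
--     right = len(cKeys)-1
--     answer = 0
--     while left!=right:
--         mNum = c[cKeys[left]]
--         MNum = c[cKeys[right]]
--         if P*mNum<Q*MNum: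
--             answer+=P*mNum*(cKeys[left+1]-cKeys[left])
--             left+=1
--             c[cKeys[left]]+=mNum
--         else:
--             answer+=Q*MNum*(cKeys[right]-cKeys[right-1])
--             right-=1
--             c[cKeys[right]]+=MNum
--     return answer
-- ===== SOURCE B (Python) =====
-- def solution(land, P, Q):
--     # Count the heights, then charge each gap between consecutive distinct heights
--     # in one closed-form forward pass instead of the two-pointer greedy with
--     # counter mutation: a gap is paid at its "raise from below" rate P*below
--     # until the first gap where that rate is at least every remaining
--     # "dig from above" rate Q*above; from there on every gap pays its own Q*above.
--     n = len(land)
--     cnt = {}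
--     for row in land:
--         for j in range(n):
--             cnt[row[j]] = cnt.get(row[j], 0) + 1
--     ks = sorted(cnt)
--     m = len(ks) - 1                        # number of gaps between consecutive heights
--     total = sum(cnt.values())              # number of cells
--     below = []                             # below[i] = cells with height <= ks[i]
--     s = 0
--     for i in range(m):
--         s += cnt[ks[i]]
--         below.append(s)
--     L = [P * b for b in below]             # rate of filling gap i from below
--     R = [Q * (total - b) for b in below]   # rate of digging gap i from above
--     rsm = []                               # suffix maxima of R, back to front
--     cur = 0
--     for i in range(m - 1, -1, -1):
--         cur = R[i] if i == m - 1 else max(R[i], cur)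
--         rsm.append(cur)
--     sm = rsm[::-1]                         # sm[i] = max(R[i:])
--     t = m                                  # first gap whose left rate beats every remaining right rate
--     for i in range(m):
--         if L[i] >= sm[i]:
--             t = i
--             break
--     ans = 0
--     for i in range(m):
--         ans += (ks[i + 1] - ks[i]) * (L[i] if i < t else R[i])
--     return ans
-- ===== Notes on version B (the rewrite author's own statement) =====
-- stated objective: alternative
-- what changed: Replaces the two-pointer greedy that mutates the height counter while merging from both ends with a closed-form single forward pass: each gap between consecutive sorted heights is charged P*below until the first gap whose left rate reaches the running suffix-maximum of the right rates Q*above, and Q*above from there on.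
import Mathlib
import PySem

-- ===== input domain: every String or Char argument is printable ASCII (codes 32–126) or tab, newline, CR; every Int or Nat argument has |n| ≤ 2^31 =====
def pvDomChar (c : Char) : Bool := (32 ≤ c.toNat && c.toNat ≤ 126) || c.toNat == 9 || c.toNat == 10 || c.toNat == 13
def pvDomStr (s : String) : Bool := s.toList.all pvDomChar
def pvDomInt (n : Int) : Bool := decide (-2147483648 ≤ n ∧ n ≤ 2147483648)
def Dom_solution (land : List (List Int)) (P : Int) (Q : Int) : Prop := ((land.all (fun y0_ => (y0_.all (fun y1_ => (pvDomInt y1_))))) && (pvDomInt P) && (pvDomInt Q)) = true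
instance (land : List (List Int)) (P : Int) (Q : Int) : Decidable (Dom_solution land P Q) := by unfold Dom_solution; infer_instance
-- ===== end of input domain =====

-- B replaces A's two-pointer greedy (which mutates the height counter while merging
-- from both ends) by a closed-form single forward pass over the gaps between
-- consecutive sorted heights; return values agree on all of Pre_ (A mutates nothing).

-- ===== PORT A =====
-- the 'while left != right' loop of A; fuel bounds the iteration count (the loop runs
-- at most len(cKeys)-1 times inside Pre_); dict lookups c[k] are ported with getD 0 —
-- a KeyError is impossible inside Pre_ (every looked-up key is a key of c).
def solutionLoop (cKeys : List Int) (P : Int) (Q : Int) :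
    Nat → PySem.Dict Int Int → Int → Int → Int → Int
  | 0, _, _, _, answer => answer
  | fuel+1, c, left, right, answer =>
    if left = right then answer
    else
      let mNum := c.getD (PySem.List.pyGetD cKeys left 0) 0
      let MNum := c.getD (PySem.List.pyGetD cKeys right 0) 0
      if P * mNum < Q * MNum then
        let answer' := answer + P * mNum * (PySem.List.pyGetD cKeys (left+1) 0 - PySem.List.pyGetD cKeys left 0)
        let left' := left + 1
        let c' := c.insert (PySem.List.pyGetD cKeys left' 0) (c.getD (PySem.List.pyGetD cKeys left' 0) 0 + mNum)
        solutionLoop cKeys P Q fuel c' left' right answer'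
      else
        let answer' := answer + Q * MNum * (PySem.List.pyGetD cKeys right 0 - PySem.List.pyGetD cKeys (right-1) 0)
        let right' := right - 1
        let c' := c.insert (PySem.List.pyGetD cKeys right' 0) (c.getD (PySem.List.pyGetD cKeys right' 0) 0 + MNum)
        solutionLoop cKeys P Q fuel c' left right' answer'

def solution (land : List (List Int)) (P : Int) (Q : Int) : Int :=
  let n : Int := PySem.List.len land
  let c := (PySem.List.pyRange 0 n).foldl (fun c i =>
      (PySem.List.pyRange 0 n).foldl (fun c j =>
        if c.contains (PySem.List.pyGetD (PySem.List.pyGetD land i []) j 0) then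
          c.insert (PySem.List.pyGetD (PySem.List.pyGetD land i []) j 0)
            (c.getD (PySem.List.pyGetD (PySem.List.pyGetD land i []) j 0) 0 + 1)
        else c.insert (PySem.List.pyGetD (PySem.List.pyGetD land i []) j 0) 1) c)
    PySem.Dict.empty
  let cKeys := PySem.List.sorted c.keys (fun x => x)
  solutionLoop cKeys P Q cKeys.length c 0 (PySem.List.len cKeys - 1) 0

-- ===== PORT B =====
def solution_alt (land : List (List Int)) (P : Int) (Q : Int) : Int :=
  let n : Int := PySem.List.len land
  let cnt := land.foldl (fun cnt row =>
      (PySem.List.pyRange 0 n).foldl (fun cnt j =>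
        cnt.insert (PySem.List.pyGetD row j 0)
          (cnt.getD (PySem.List.pyGetD row j 0) 0 + 1)) cnt) PySem.Dict.empty
  let ks := PySem.List.sorted cnt.keys (fun x => x)
  let m : Int := PySem.List.len ks - 1
  let total := cnt.values.sum
  let below := ((PySem.List.pyRange 0 m).foldl (fun (p : List Int × Int) i =>
      (p.1 ++ [p.2 + cnt.getD (PySem.List.pyGetD ks i 0) 0],
       p.2 + cnt.getD (PySem.List.pyGetD ks i 0) 0)) ([], 0)).1
  let L := below.map (fun b => P * b)
  let R := below.map (fun b => Q * (total - b))
  let rsm := ((PySem.List.pyRange (m-1) (-1) (-1)).foldl (fun (p : List Int × Int) i =>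
      (p.1 ++ [if i = m - 1 then PySem.List.pyGetD R i 0 else max (PySem.List.pyGetD R i 0) p.2],
       if i = m - 1 then PySem.List.pyGetD R i 0 else max (PySem.List.pyGetD R i 0) p.2)) ([], 0)).1
  let sm := rsm.reverse   -- rsm[::-1]
  let t := ((PySem.List.pyRange 0 m).foldl (fun (p : Int × Bool) i =>
      if p.2 then p
      else if PySem.List.pyGetD sm i 0 ≤ PySem.List.pyGetD L i 0 then (i, true) else p)
      (m, false)).1   -- 'for i in range(m): if L[i]>=sm[i]: t=i; break' (p.2 = broken-out flag)
  (PySem.List.pyRange 0 m).foldl (fun ans i =>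
      ans + (PySem.List.pyGetD ks (i+1) 0 - PySem.List.pyGetD ks i 0) *
        (if i < t then PySem.List.pyGetD L i 0 else PySem.List.pyGetD R i 0)) 0

-- ===== PRECONDITION & SPEC =====
-- Pre_ = exactly the inputs where A returns normally: a nonempty land whose first
-- len(land) entries of every row exist (A indexes land[i][j] for i,j < len(land);
-- on empty land or a too-short row A raises IndexError).
def Pre_solution (land : List (List Int)) (P : Int) (Q : Int) : Prop :=
  land ≠ [] ∧ ∀ row ∈ land, land.length ≤ row.length
instance (land : List (List Int)) (P : Int) (Q : Int) : Decidable (Pre_solution land P Q) := by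
  unfold Pre_solution; infer_instance
def pvWitness_solution : List (List Int) × Int × Int := ([[1, 2], [3, 1]], 3, 2)

def Spec_solution (land : List (List Int)) (P : Int) (Q : Int) (out : Int) : Prop :=
  out = solution_alt land P Q
instance (land : List (List Int)) (P : Int) (Q : Int) (out : Int) : Decidable (Spec_solution land P Q out) := by
  unfold Spec_solution; infer_instance

-- ===== CLAIM (what is proved, stated in full; the proofs are below) =====
def Claim_equal_solution : Prop := ∀ (land : List (List Int)) (P : Int) (Q : Int),
  Dom_solution land P Q → Pre_solution land P Q → Spec_solution land P Q (solution land P Q)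
-- ===== LEMMAS AND PROOFS =====



def preS (cnt : Int → Int) (ks : List Int) (i : Nat) : Int := ((ks.take (i+1)).map cnt).sum
def sufS (cnt : Int → Int) (ks : List Int) (i : Nat) : Int := ((ks.drop i).map cnt).sum
def gapS (ks : List Int) (i : Nat) : Int := ks.getD (i+1) 0 - ks.getD i 0
def LvS (P : Int) (cnt : Int → Int) (ks : List Int) (i : Nat) : Int := P * preS cnt ks i
def RvS (Q : Int) (cnt : Int → Int) (ks : List Int) (i : Nat) : Int := Q * sufS cnt ks (i+1)

def smaxS (Q : Int) (cnt : Int → Int) (ks : List Int) (r i : Nat) : Int :=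
  if i + 1 < r then max (RvS Q cnt ks i) (smaxS Q cnt ks r (i+1)) else RvS Q cnt ks i
termination_by r - i

def tIdxS (P Q : Int) (cnt : Int → Int) (ks : List Int) (l r : Nat) : Nat :=
  if l < r then (if smaxS Q cnt ks r l ≤ LvS P cnt ks l then l else tIdxS P Q cnt ks (l+1) r) else r
termination_by r - l

def WS (P Q : Int) (cnt : Int → Int) (ks : List Int) (l r : Nat) : Int :=
  ((List.range' l (r - l)).map (fun i =>
    gapS ks i * (if i < tIdxS P Q cnt ks l r then LvS P cnt ks i else RvS Q cnt ks i))).sum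

def GS (P Q : Int) (cnt : Int → Int) (ks : List Int) (l r : Nat) : Int :=
  if l < r then
    (if LvS P cnt ks l < RvS Q cnt ks (r-1) then
      LvS P cnt ks l * gapS ks l + GS P Q cnt ks (l+1) r
     else RvS Q cnt ks (r-1) * gapS ks (r-1) + GS P Q cnt ks l (r-1))
  else 0
termination_by r - l

theorem preS_succ (cnt : Int → Int) (ks : List Int) (i : Nat) (h : i + 1 < ks.length) :
    preS cnt ks (i+1) = preS cnt ks i + cnt (ks.getD (i+1) 0) := by
  unfold preS
  rw [List.getD_eq_getElem ks 0 h, List.map_take, List.map_take,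
    List.sum_take_succ (ks.map cnt) (i+1) (by simpa using h)]
  simp

theorem sufS_succ (cnt : Int → Int) (ks : List Int) (i : Nat) (h : i < ks.length) :
    sufS cnt ks i = cnt (ks.getD i 0) + sufS cnt ks (i+1) := by
  unfold sufS
  rw [List.getD_eq_getElem ks 0 h, List.map_drop, List.map_drop,
    List.sum_drop_succ (ks.map cnt) i (by simpa using h)]
  simp

theorem preS_pos (cnt : Int → Int) (ks : List Int) (hpos : ∀ k ∈ ks, 0 < cnt k)
    (i : Nat) (h : i < ks.length) : 0 < preS cnt ks i := by
  induction i with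
  | zero =>
    unfold preS
    rw [List.map_take, List.sum_take_succ (ks.map cnt) 0 (by simpa using h)]
    simpa using hpos _ (List.getElem_mem h)
  | succ n ih =>
    rw [preS_succ cnt ks n h]
    have h1 : n < ks.length := by omega
    have := hpos (ks.getD (n+1) 0) (by rw [List.getD_eq_getElem ks 0 h]; exact List.getElem_mem h)
    have := ih h1
    omega

theorem sufS_nonneg (cnt : Int → Int) (ks : List Int) (hpos : ∀ k ∈ ks, 0 < cnt k)
    (i : Nat) : 0 ≤ sufS cnt ks i := by
  unfold sufS
  apply List.sum_nonneg
  intro x hx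
  obtain ⟨k, hk, rfl⟩ := List.mem_map.mp hx
  exact le_of_lt (hpos k (List.mem_of_mem_drop hk))

theorem preS_mono (cnt : Int → Int) (ks : List Int) (hpos : ∀ k ∈ ks, 0 < cnt k)
    {i j : Nat} (hij : i ≤ j) (hj : j < ks.length) : preS cnt ks i ≤ preS cnt ks j := by
  induction j with
  | zero =>
    have : i = 0 := by omega
    subst this; exact le_refl _
  | succ n ih =>
    rcases Nat.eq_or_lt_of_le hij with rfl | hlt
    · exact le_refl _
    · have h1 : i ≤ n := by omega
      have := ih h1 (by omega)
      rw [preS_succ cnt ks n hj]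
      have := hpos (ks.getD (n+1) 0) (by rw [List.getD_eq_getElem ks 0 hj]; exact List.getElem_mem hj)
      omega

theorem sufS_anti (cnt : Int → Int) (ks : List Int) (hpos : ∀ k ∈ ks, 0 < cnt k)
    {i j : Nat} (hij : i ≤ j) : sufS cnt ks j ≤ sufS cnt ks i := by
  induction j with
  | zero =>
    have : i = 0 := by omega
    subst this; exact le_refl _
  | succ n ih =>
    rcases Nat.eq_or_lt_of_le hij with rfl | hlt
    · exact le_refl _
    · have h1 : i ≤ n := by omega
      refine le_trans ?_ (ih h1)
      by_cases h : n < ks.length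
      · rw [sufS_succ cnt ks n h]
        have := hpos (ks.getD n 0) (by rw [List.getD_eq_getElem ks 0 h]; exact List.getElem_mem h)
        omega
      · unfold sufS
        rw [List.drop_eq_nil_of_le (by omega), List.drop_eq_nil_of_le (by omega)]

theorem le_smaxS (Q : Int) (cnt : Int → Int) (ks : List Int) {r i p : Nat}
    (hip : i ≤ p) (hpr : p < r) : RvS Q cnt ks p ≤ smaxS Q cnt ks r i := by
  induction hd : r - i generalizing i with
  | zero => omega
  | succ n ih =>
    unfold smaxS
    by_cases h : i + 1 < r
    · rw [if_pos h]
      rcases Nat.eq_or_lt_of_le hip with rfl | hlt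
      · exact le_max_left _ _
      · exact le_trans (ih (by omega) (by omega)) (le_max_right _ _)
    · rw [if_neg h]
      have : p = i := by omega
      subst this; exact le_refl _

theorem smaxS_le (Q : Int) (cnt : Int → Int) (ks : List Int) {r i : Nat} {c : Int}
    (hir : i < r) (hb : ∀ p, i ≤ p → p < r → RvS Q cnt ks p ≤ c) : smaxS Q cnt ks r i ≤ c := by
  induction hd : r - i generalizing i with
  | zero => omega
  | succ n ih =>
    unfold smaxS
    by_cases h : i + 1 < r
    · rw [if_pos h]
      exact max_le (hb i (le_refl _) hir) (ih (by omega) (fun p hp1 hp2 => hb p (by omega) hp2) (by omega))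
    · rw [if_neg h]
      exact hb i (le_refl _) hir

theorem smaxS_succ_r (Q : Int) (cnt : Int → Int) (ks : List Int) {r i : Nat}
    (h : i < r) : smaxS Q cnt ks (r+1) i = max (smaxS Q cnt ks r i) (RvS Q cnt ks r) := by
  induction hd : r - i generalizing i with
  | zero => omega
  | succ n ih =>
    by_cases h2 : i + 1 < r
    · conv_lhs => rw [smaxS]
      rw [if_pos (show i + 1 < r + 1 by omega)]
      conv_rhs => rw [smaxS]
      rw [if_pos h2, ih (by omega) (by omega), max_assoc]
    · have hieq : i + 1 = r := by omega
      conv_lhs => rw [smaxS]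
      rw [if_pos (show i + 1 < r + 1 by omega)]
      conv_rhs => rw [smaxS]
      rw [if_neg h2]
      have hinner : smaxS Q cnt ks (r+1) (i+1) = RvS Q cnt ks (i+1) := by
        rw [smaxS, if_neg (by omega)]
      rw [hinner, hieq]

theorem le_tIdxS (P Q : Int) (cnt : Int → Int) (ks : List Int) (l r : Nat) :
    l ≤ r → l ≤ tIdxS P Q cnt ks l r := by
  induction hd : r - l generalizing l with
  | zero => intro h; rw [tIdxS, if_neg (by omega)]; exact h
  | succ n ih =>
    intro h
    rw [tIdxS, if_pos (show l < r by omega)]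
    split
    · exact le_refl _
    · exact le_trans (by omega) (ih (l+1) (by omega) (by omega))

theorem LvS_mono (P Q : Int) (cnt : Int → Int) (ks : List Int) (hpos : ∀ k ∈ ks, 0 < cnt k)
    (hP : 0 ≤ P) {i j : Nat} (hij : i ≤ j) (hj : j < ks.length) :
    LvS P cnt ks i ≤ LvS P cnt ks j :=
  mul_le_mul_of_nonneg_left (preS_mono cnt ks hpos hij hj) hP

theorem RvS_mono_of_neg (Q : Int) (cnt : Int → Int) (ks : List Int) (hpos : ∀ k ∈ ks, 0 < cnt k)
    (hQ : Q < 0) {i j : Nat} (hij : i ≤ j) : RvS Q cnt ks i ≤ RvS Q cnt ks j := by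
  unfold RvS
  have h := sufS_anti cnt ks hpos (show i + 1 ≤ j + 1 by omega)
  nlinarith

theorem RvS_nonneg (Q : Int) (cnt : Int → Int) (ks : List Int) (hpos : ∀ k ∈ ks, 0 < cnt k)
    (hQ : 0 ≤ Q) (i : Nat) : 0 ≤ RvS Q cnt ks i :=
  mul_nonneg hQ (sufS_nonneg cnt ks hpos (i+1))

theorem LvS_neg (P : Int) (cnt : Int → Int) (ks : List Int) (hpos : ∀ k ∈ ks, 0 < cnt k)
    (hP : P < 0) {i : Nat} (h : i < ks.length) : LvS P cnt ks i < 0 :=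
  mul_neg_of_neg_of_pos hP (preS_pos cnt ks hpos i h)

theorem tIdxS_window_posP (P Q : Int) (cnt : Int → Int) (ks : List Int)
    (hpos : ∀ k ∈ ks, 0 < cnt k) (hP : 0 ≤ P) {l r : Nat} (hlr : l < r) (hrlen : r ≤ ks.length)
    (hc : RvS Q cnt ks (r-1) ≤ LvS P cnt ks l) :
    tIdxS P Q cnt ks l r = tIdxS P Q cnt ks l (r-1) ∧ tIdxS P Q cnt ks l r ≤ r - 1 := by
  induction hd : r - l generalizing l with
  | zero => omega
  | succ n ih =>
    by_cases hend : l + 1 < r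
    · -- l < r - 1
      have hw : smaxS Q cnt ks r l = max (smaxS Q cnt ks (r-1) l) (RvS Q cnt ks (r-1)) := by
        have := smaxS_succ_r Q cnt ks (show l < r - 1 by omega)
        rwa [show r - 1 + 1 = r by omega] at this
      by_cases hcond : smaxS Q cnt ks (r-1) l ≤ LvS P cnt ks l
      · have h1 : tIdxS P Q cnt ks l r = l := by
          rw [tIdxS, if_pos hlr, if_pos (by rw [hw]; exact max_le hcond hc)]
        have h2 : tIdxS P Q cnt ks l (r-1) = l := by
          rw [tIdxS, if_pos (show l < r - 1 by omega), if_pos hcond]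
        rw [h1, h2]; omega
      · have hnot : ¬ smaxS Q cnt ks r l ≤ LvS P cnt ks l := by
          rw [hw]; intro hle
          exact hcond (le_trans (le_max_left _ _) hle)
        have h1 : tIdxS P Q cnt ks l r = tIdxS P Q cnt ks (l+1) r := by
          rw [tIdxS, if_pos hlr, if_neg hnot]
        have h2 : tIdxS P Q cnt ks l (r-1) = tIdxS P Q cnt ks (l+1) (r-1) := by
          rw [tIdxS, if_pos (show l < r - 1 by omega), if_neg hcond]
        have hc' : RvS Q cnt ks (r-1) ≤ LvS P cnt ks (l+1) :=
          le_trans hc (LvS_mono P Q cnt ks hpos hP (by omega) (by omega))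
        obtain ⟨e1, e2⟩ := ih (show l + 1 < r by omega) hc' (by omega)
        rw [h1, h2]; exact ⟨e1, by omega⟩
    · -- l = r - 1
      have hl : l = r - 1 := by omega
      have hsm : smaxS Q cnt ks r l = RvS Q cnt ks l := by rw [smaxS, if_neg (by omega)]
      have hrv : RvS Q cnt ks l = RvS Q cnt ks (r-1) := by rw [hl]
      have h1 : tIdxS P Q cnt ks l r = l := by
        rw [tIdxS, if_pos hlr, if_pos (by rw [hsm, hrv]; exact hc)]
      have h2 : tIdxS P Q cnt ks l (r-1) = r - 1 := by
        rw [tIdxS, if_neg (by omega)]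
      rw [h1, h2]; omega

theorem tIdxS_window (P Q : Int) (cnt : Int → Int) (ks : List Int)
    (hpos : ∀ k ∈ ks, 0 < cnt k) {l r : Nat} (hlr : l < r) (hrlen : r ≤ ks.length)
    (hc : RvS Q cnt ks (r-1) ≤ LvS P cnt ks l) :
    tIdxS P Q cnt ks l r = tIdxS P Q cnt ks l (r-1) ∧ tIdxS P Q cnt ks l r ≤ r - 1 := by
  by_cases hP : 0 ≤ P
  · exact tIdxS_window_posP P Q cnt ks hpos hP hlr hrlen hc
  · have hP' : P < 0 := by omega
    have hQ : Q < 0 := by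
      by_contra hQ
      have h1 := RvS_nonneg Q cnt ks hpos (by omega) (r-1)
      have h2 := LvS_neg P cnt ks hpos hP' (show l < ks.length by omega)
      omega
    have h1 : tIdxS P Q cnt ks l r = l := by
      rw [tIdxS, if_pos hlr, if_pos]
      apply smaxS_le Q cnt ks hlr
      intro p hp1 hp2
      exact le_trans (RvS_mono_of_neg Q cnt ks hpos hQ (show p ≤ r - 1 by omega)) hc
    have h2 : tIdxS P Q cnt ks l (r-1) = l := by
      by_cases hend : l < r - 1
      · rw [tIdxS, if_pos hend, if_pos]
        apply smaxS_le Q cnt ks hend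
        intro p hp1 hp2
        exact le_trans (RvS_mono_of_neg Q cnt ks hpos hQ (show p ≤ r - 1 by omega)) hc
      · rw [tIdxS, if_neg hend]; omega
    rw [h1, h2]; omega

theorem WS_of_le (P Q : Int) (cnt : Int → Int) (ks : List Int) {l r : Nat} (h : r ≤ l) :
    WS P Q cnt ks l r = 0 := by
  unfold WS
  rw [Nat.sub_eq_zero_of_le h]
  simp

theorem WS_left (P Q : Int) (cnt : Int → Int) (ks : List Int) {l r : Nat} (h : l < r)
    (ht : l < tIdxS P Q cnt ks (l+1) r)
    (hteq : tIdxS P Q cnt ks l r = tIdxS P Q cnt ks (l+1) r) :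
    WS P Q cnt ks l r = gapS ks l * LvS P cnt ks l + WS P Q cnt ks (l+1) r := by
  unfold WS
  rw [show r - l = (r - (l+1)) + 1 by omega, List.range'_succ]
  simp only [List.map_cons, List.sum_cons]
  rw [hteq, if_pos ht]

theorem WS_right (P Q : Int) (cnt : Int → Int) (ks : List Int) {l r : Nat} (h : l < r)
    (ht : tIdxS P Q cnt ks l r ≤ r - 1)
    (hteq : tIdxS P Q cnt ks l r = tIdxS P Q cnt ks l (r-1)) :
    WS P Q cnt ks l r = WS P Q cnt ks l (r-1) + gapS ks (r-1) * RvS Q cnt ks (r-1) := by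
  unfold WS
  rw [show r - l = (r - 1 - l) + 1 by omega, List.range'_concat,
    show l + 1 * (r - 1 - l) = r - 1 by omega, List.map_append, List.sum_append]
  simp only [List.map_cons, List.map_nil, List.sum_cons, List.sum_nil, add_zero]
  rw [if_neg (by omega), ← hteq]

theorem GS_eq_WS (P Q : Int) (cnt : Int → Int) (ks : List Int)
    (hpos : ∀ k ∈ ks, 0 < cnt k) {l r : Nat} (hlr : l ≤ r) (hrlen : r < ks.length) :
    GS P Q cnt ks l r = WS P Q cnt ks l r := by
  induction hd : r - l generalizing l r with
  | zero =>
    have : l = r := by omega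
    subst this
    rw [GS, if_neg (by omega), WS_of_le P Q cnt ks (le_refl _)]
  | succ n ih =>
    have h : l < r := by omega
    by_cases hlt : LvS P cnt ks l < RvS Q cnt ks (r-1)
    · have h1 : RvS Q cnt ks (r-1) ≤ smaxS Q cnt ks r l :=
        le_smaxS Q cnt ks (show l ≤ r - 1 by omega) (show r - 1 < r by omega)
      have hnot : ¬ smaxS Q cnt ks r l ≤ LvS P cnt ks l := by omega
      have hteq : tIdxS P Q cnt ks l r = tIdxS P Q cnt ks (l+1) r := by
        rw [tIdxS, if_pos h, if_neg hnot]
      have ht : l < tIdxS P Q cnt ks (l+1) r :=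
        lt_of_lt_of_le (by omega) (le_tIdxS P Q cnt ks (l+1) r (by omega))
      rw [GS, if_pos h, if_pos hlt, WS_left P Q cnt ks h ht hteq,
        ih (by omega) hrlen (by omega)]
      ring
    · have hc : RvS Q cnt ks (r-1) ≤ LvS P cnt ks l := by omega
      obtain ⟨hteq, ht⟩ := tIdxS_window P Q cnt ks hpos h (by omega) hc
      rw [GS, if_pos h, if_neg hlt, WS_right P Q cnt ks h ht hteq,
        ih (by omega) (by omega) (by omega)]
      ring

-- DEV

theorem ks_getD_lt {ks : List Int} (hks : List.Pairwise (· < ·) ks) {i j : Nat}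
    (hij : i < j) (hj : j < ks.length) : ks.getD i 0 < ks.getD j 0 := by
  rw [List.getD_eq_getElem _ _ (lt_trans hij hj), List.getD_eq_getElem _ _ hj]
  exact List.pairwise_iff_getElem.mp hks i j (lt_trans hij hj) hj hij

theorem loop_eq_GS (ks : List Int) (P Q : Int) (cnt : Int → Int)
    (hks : List.Pairwise (· < ·) ks) :
    ∀ (fuel : Nat) (l r : Nat) (c : PySem.Dict Int Int) (ans : Int),
    l ≤ r → r < ks.length → r - l ≤ fuel →
    (l < r →
      (c.getD (ks.getD l 0) 0 = preS cnt ks l ∧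
       c.getD (ks.getD r 0) 0 = sufS cnt ks r ∧
       ∀ i : Nat, l < i → i < r → c.getD (ks.getD i 0) 0 = cnt (ks.getD i 0))) →
    solutionLoop ks P Q fuel c (l : Int) (r : Int) ans = ans + GS P Q cnt ks l r := by
  intro fuel
  induction fuel with
  | zero =>
    intro l r c ans hlr hrlen hfuel _
    have : l = r := by omega
    subst this
    rw [solutionLoop, GS, if_neg (by omega)]
    omega
  | succ fuel ih =>
    intro l r c ans hlr hrlen hfuel hinv
    by_cases heq : l = r
    · subst heq
      rw [solutionLoop, if_pos rfl, GS, if_neg (by omega)]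
      omega
    · have hlt : l < r := by omega
      obtain ⟨hL, hR, hI⟩ := hinv hlt
      have hne : ((l : Int)) ≠ ((r : Int)) := by exact_mod_cast heq
      rw [solutionLoop, if_neg hne]
      simp only [PySem.List.pyGetD_natCast]
      rw [hL, hR]
      have hcastl : (l : Int) + 1 = ((l + 1 : Nat) : Int) := by push_cast; ring
      have hcastr : (r : Int) - 1 = ((r - 1 : Nat) : Int) := by
        have : 1 ≤ r := by omega
        push_cast [this]; ring
      have hrv : RvS Q cnt ks (r-1) = Q * sufS cnt ks r := by
        unfold RvS; rw [show r - 1 + 1 = r by omega]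
      by_cases hcond : P * preS cnt ks l < Q * sufS cnt ks r
      · rw [if_pos hcond]
        rw [hcastl]
        simp only [PySem.List.pyGetD_natCast]
        rw [ih (l+1) r _ _ (by omega) hrlen (by omega) ?_]
        · conv_rhs => rw [GS]
          rw [if_pos hlt, if_pos (by rw [← hrv] at hcond; exact hcond)]
          unfold LvS gapS
          ring
        · intro hlt2
          have hneq_r : ks.getD r 0 ≠ ks.getD (l+1) 0 :=
            ne_of_gt (ks_getD_lt hks (by omega) hrlen)
          refine ⟨?_, ?_, ?_⟩
          · rw [PySem.Dict.getD_insert_self, hI (l+1) (by omega) (by omega),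
              preS_succ cnt ks l (by omega)]
            ring
          · rw [PySem.Dict.getD_insert_of_ne _ _ _ hneq_r, hR]
          · intro i hi1 hi2
            have hneq : ks.getD i 0 ≠ ks.getD (l+1) 0 :=
              ne_of_gt (ks_getD_lt hks (by omega) (by omega))
            rw [PySem.Dict.getD_insert_of_ne _ _ _ hneq]
            exact hI i (by omega) hi2
      · rw [if_neg hcond]
        rw [hcastr]
        simp only [PySem.List.pyGetD_natCast]
        rw [ih l (r-1) _ _ (by omega) (by omega) (by omega) ?_]
        · conv_rhs => rw [GS]
          rw [if_pos hlt, if_neg (by rw [← hrv] at hcond; exact hcond), hrv]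
          unfold gapS
          rw [show r - 1 + 1 = r by omega]
          ring
        · intro hlt2
          have hneq_l : ks.getD l 0 ≠ ks.getD (r-1) 0 :=
            ne_of_lt (ks_getD_lt hks (by omega) (by omega))
          refine ⟨?_, ?_, ?_⟩
          · rw [PySem.Dict.getD_insert_of_ne _ _ _ hneq_l, hL]
          · rw [PySem.Dict.getD_insert_self, hI (r-1) (by omega) (by omega),
              sufS_succ cnt ks (r-1) (by omega), show r - 1 + 1 = r by omega]
          · intro i hi1 hi2
            have hneq : ks.getD i 0 ≠ ks.getD (r-1) 0 :=
              ne_of_lt (ks_getD_lt hks (by omega) (by omega))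
            rw [PySem.Dict.getD_insert_of_ne _ _ _ hneq]
            exact hI i hi1 (by omega)

-- the multiset of cells A and B count: the first len(land) entries of every row
def cellsS (land : List (List Int)) : List Int :=
  (land.map (fun row => row.take land.length)).flatten

def cntS (land : List (List Int)) : Int → Int := fun k => ((cellsS land).count k : Int)

def ksS (land : List (List Int)) : List Int :=
  PySem.List.sorted (PySem.Dict.counter (cellsS land)).keys (fun x => x)

theorem foldl_pyRange_pyGetD_take {α β : Type} (xs : List α) (d : α) (f : β → α → β) :
    ∀ (k : Nat) (init : β), k ≤ xs.length →
    (PySem.List.pyRange 0 (k : Int)).foldl (fun acc j => f acc (PySem.List.pyGetD xs j d)) init =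
      (xs.take k).foldl f init := by
  intro k
  induction k with
  | zero => intro init _; simp [PySem.List.pyRange_zero_nat]
  | succ k ih =>
    intro init hk
    have hcast : ((k + 1 : Nat) : Int) = (k : Int) + 1 := by push_cast; ring
    rw [hcast, PySem.List.pyRange_one_succ_right (by positivity), List.foldl_append]
    have hklt : k < xs.length := by omega
    rw [ih init (by omega), List.take_add_one, List.getElem?_eq_getElem hklt]
    simp only [List.foldl_append, Option.toList_some, List.foldl_cons, List.foldl_nil]
    rw [PySem.List.pyGetD_natCast, List.getD_eq_getElem xs d hklt]

theorem stepAB (c : PySem.Dict Int Int) (v : Int) :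
    (if c.contains v then c.insert v (c.getD v 0 + 1) else c.insert v 1) =
      c.insert v (c.getD v 0 + 1) := by
  by_cases h : c.contains v = true
  · rw [if_pos h]
  · rw [if_neg h]
    have h0 : c.getD v 0 = 0 := by
      unfold PySem.Dict.getD
      rw [(PySem.Dict.get?_eq_none_iff_contains c v).mpr (by simpa using h)]
      rfl
    rw [h0]
    norm_num

theorem flatten_foldl {α β : Type} (f : β → α → β) :
    ∀ (ls : List (List α)) (init : β),
    (ls.flatten).foldl f init = ls.foldl (fun acc l => l.foldl f acc) init := by
  intro ls
  induction ls with
  | nil => intro init; simp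
  | cons hd tl ih => intro init; simp [List.foldl_append, ih]

theorem innerA_eq (land : List (List Int)) (row : List Int) (h : land.length ≤ row.length) :
    ∀ (c : PySem.Dict Int Int),
    (PySem.List.pyRange 0 ((land.length : Nat) : Int)).foldl (fun c j =>
        if c.contains (PySem.List.pyGetD row j 0) then
          c.insert (PySem.List.pyGetD row j 0) (c.getD (PySem.List.pyGetD row j 0) 0 + 1)
        else c.insert (PySem.List.pyGetD row j 0) 1) c =
      (row.take land.length).foldl (fun d x => d.insert x (d.getD x 0 + 1)) c := by
  intro c
  have h1 := foldl_pyRange_pyGetD_take row 0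
    (fun (c : PySem.Dict Int Int) v => if c.contains v then c.insert v (c.getD v 0 + 1) else c.insert v 1)
    land.length c h
  rw [h1]
  exact List.foldl_ext _ _ c (fun c v _ => stepAB c v)

theorem innerB_eq (land : List (List Int)) (row : List Int) (h : land.length ≤ row.length) :
    ∀ (c : PySem.Dict Int Int),
    (PySem.List.pyRange 0 ((land.length : Nat) : Int)).foldl (fun c j =>
        c.insert (PySem.List.pyGetD row j 0) (c.getD (PySem.List.pyGetD row j 0) 0 + 1)) c =
      (row.take land.length).foldl (fun d x => d.insert x (d.getD x 0 + 1)) c :=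
  fun c => foldl_pyRange_pyGetD_take row 0
    (fun (c : PySem.Dict Int Int) v => c.insert v (c.getD v 0 + 1)) land.length c h

theorem rows_fold_eq_counter (land : List (List Int)) :
    land.foldl (fun c row => (row.take land.length).foldl
        (fun d x => d.insert x (d.getD x 0 + 1)) c) PySem.Dict.empty =
      PySem.Dict.counter (cellsS land) := by
  rw [← PySem.Dict.foldl_insert_getD_add_one_eq_counter, cellsS, flatten_foldl,
    List.foldl_map]

theorem buildA_eq_counter (land : List (List Int))
    (hpre : ∀ row ∈ land, land.length ≤ row.length) :
    (PySem.List.pyRange 0 (PySem.List.len land)).foldl (fun c i =>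
        (PySem.List.pyRange 0 (PySem.List.len land)).foldl (fun c j =>
          if c.contains (PySem.List.pyGetD (PySem.List.pyGetD land i []) j 0) then
            c.insert (PySem.List.pyGetD (PySem.List.pyGetD land i []) j 0)
              (c.getD (PySem.List.pyGetD (PySem.List.pyGetD land i []) j 0) 0 + 1)
          else c.insert (PySem.List.pyGetD (PySem.List.pyGetD land i []) j 0) 1) c)
      PySem.Dict.empty = PySem.Dict.counter (cellsS land) := by
  have h1 : (PySem.List.pyRange 0 (PySem.List.len land)).foldl (fun (c : PySem.Dict Int Int) i =>
        (PySem.List.pyRange 0 (PySem.List.len land)).foldl (fun c j =>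
          if c.contains (PySem.List.pyGetD (PySem.List.pyGetD land i []) j 0) then
            c.insert (PySem.List.pyGetD (PySem.List.pyGetD land i []) j 0)
              (c.getD (PySem.List.pyGetD (PySem.List.pyGetD land i []) j 0) 0 + 1)
          else c.insert (PySem.List.pyGetD (PySem.List.pyGetD land i []) j 0) 1) c)
      PySem.Dict.empty =
      land.foldl (fun (c : PySem.Dict Int Int) row =>
        (PySem.List.pyRange 0 ((land.length : Nat) : Int)).foldl (fun c j =>
          if c.contains (PySem.List.pyGetD row j 0) then
            c.insert (PySem.List.pyGetD row j 0) (c.getD (PySem.List.pyGetD row j 0) 0 + 1)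
          else c.insert (PySem.List.pyGetD row j 0) 1) c)
      PySem.Dict.empty := by
    rw [PySem.List.len_eq]
    exact PySem.List.foldl_pyRange_zero_pyGetD' land ([] : List Int)
      (fun (c : PySem.Dict Int Int) row =>
        (PySem.List.pyRange 0 ((land.length : Nat) : Int)).foldl (fun c j =>
          if c.contains (PySem.List.pyGetD row j 0) then
            c.insert (PySem.List.pyGetD row j 0) (c.getD (PySem.List.pyGetD row j 0) 0 + 1)
          else c.insert (PySem.List.pyGetD row j 0) 1) c)
      PySem.Dict.empty
  refine h1.trans ?_
  rw [List.foldl_ext _ _ _ (fun c row hrow => innerA_eq land row (hpre row hrow) c)]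
  exact rows_fold_eq_counter land

theorem buildB_eq_counter (land : List (List Int))
    (hpre : ∀ row ∈ land, land.length ≤ row.length) :
    land.foldl (fun c row =>
        (PySem.List.pyRange 0 (PySem.List.len land)).foldl (fun c j =>
          c.insert (PySem.List.pyGetD row j 0)
            (c.getD (PySem.List.pyGetD row j 0) 0 + 1)) c) PySem.Dict.empty =
      PySem.Dict.counter (cellsS land) := by
  rw [PySem.List.len_eq,
    List.foldl_ext _ _ _ (fun c row hrow => innerB_eq land row (hpre row hrow) c),
    rows_fold_eq_counter]

theorem ksS_pairwise (land : List (List Int)) : (ksS land).Pairwise (· < ·) := by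
  rw [ksS, PySem.Dict.keys_counter]
  exact PySem.List.sorted_ofList_pairwise_lt _

theorem mem_ksS (land : List (List Int)) (k : Int) : k ∈ ksS land ↔ k ∈ cellsS land := by
  rw [ksS, PySem.List.mem_sorted, PySem.Dict.keys_counter, PySem.Set.mem_ofList]

theorem cntS_pos (land : List (List Int)) : ∀ k ∈ ksS land, 0 < cntS land k := by
  intro k hk
  unfold cntS
  exact_mod_cast List.count_pos_iff.mpr ((mem_ksS land k).mp hk)

theorem ksS_ne_nil (land : List (List Int)) (hne : land ≠ [])
    (hrows : ∀ row ∈ land, land.length ≤ row.length) : ksS land ≠ [] := by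
  intro h
  rw [ksS, PySem.List.sorted_eq_nil_iff, PySem.Dict.keys_counter] at h
  have hcells : cellsS land ≠ [] := by
    obtain ⟨r0, rest, rfl⟩ := List.exists_cons_of_ne_nil hne
    have h0 : r0.take (r0 :: rest).length ≠ [] := by
      have hlen := hrows r0 List.mem_cons_self
      rw [Ne, List.take_eq_nil_iff]
      rintro (h1 | h2)
      · simp at h1
      · rw [h2] at hlen; simp at hlen
    unfold cellsS
    simp only [List.map_cons, List.flatten_cons]
    intro hx
    exact h0 (List.append_eq_nil_iff.mp hx).1
  obtain ⟨c0, cs, hc⟩ := List.exists_cons_of_ne_nil hcells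
  have : c0 ∈ PySem.Set.ofList (cellsS land) := by
    rw [PySem.Set.mem_ofList, hc]; exact List.mem_cons_self
  rw [h] at this
  exact List.not_mem_nil this

theorem preS_zero (cnt : Int → Int) (ks : List Int) (h : ks ≠ []) :
    preS cnt ks 0 = cnt (ks.getD 0 0) := by
  obtain ⟨k0, t, rfl⟩ := List.exists_cons_of_ne_nil h
  simp [preS]

theorem sufS_last (cnt : Int → Int) (ks : List Int) (h : ks ≠ []) :
    sufS cnt ks (ks.length - 1) = cnt (ks.getD (ks.length - 1) 0) := by
  have hlt : ks.length - 1 < ks.length := by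
    cases ks with
    | nil => exact absurd rfl h
    | cons a t => simp
  rw [sufS_succ cnt ks _ hlt]
  have : sufS cnt ks (ks.length - 1 + 1) = 0 := by
    unfold sufS
    rw [List.drop_eq_nil_of_le (by omega)]
    simp
  rw [this]; ring

theorem solution_eq_GS (land : List (List Int)) (P Q : Int)
    (hne : land ≠ []) (hrows : ∀ row ∈ land, land.length ≤ row.length) :
    solution land P Q =
      GS P Q (cntS land) (ksS land) 0 ((ksS land).length - 1) := by
  unfold solution
  simp only []
  rw [buildA_eq_counter land hrows,
    show PySem.List.sorted (PySem.Dict.counter (cellsS land)).keys (fun x => x) = ksS land from rfl]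
  have hK : 1 ≤ (ksS land).length := List.length_pos_of_ne_nil (ksS_ne_nil land hne hrows)
  have hcast : PySem.List.len (ksS land) - 1 = (((ksS land).length - 1 : Nat) : Int) := by
    rw [PySem.List.len_eq]; push_cast [hK]; ring
  rw [hcast, show (0 : Int) = ((0 : Nat) : Int) from rfl,
    loop_eq_GS (ksS land) P Q (cntS land) (ksS_pairwise land) (ksS land).length 0
      ((ksS land).length - 1) _ (((0 : Nat) : Int)) (by omega) (by omega) (by omega) ?_]
  · ring
  · intro hlt
    refine ⟨?_, ?_, ?_⟩
    · rw [PySem.Dict.getD_counter, preS_zero (cntS land) _ (ksS_ne_nil land hne hrows)]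
      rfl
    · rw [PySem.Dict.getD_counter, sufS_last (cntS land) _ (ksS_ne_nil land hne hrows)]
      rfl
    · intro i _ _
      rw [PySem.Dict.getD_counter]
      rfl

theorem pre0_succ (cnt : Int → Int) (ks : List Int) {j : Nat} (h : j < ks.length) :
    ((ks.take (j+1)).map cnt).sum = ((ks.take j).map cnt).sum + cnt (ks.getD j 0) := by
  rw [List.map_take, List.map_take, List.sum_take_succ (ks.map cnt) j (by simpa using h),
    List.getD_eq_getElem ks 0 h]
  simp

theorem below_fold (cnt : Int → Int) (ks : List Int) (d : PySem.Dict Int Int)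
    (hd : ∀ v, d.getD v 0 = cnt v) :
    ∀ (j : Nat), j ≤ ks.length →
    (PySem.List.pyRange 0 (j : Int)).foldl (fun (p : List Int × Int) i =>
        (p.1 ++ [p.2 + d.getD (PySem.List.pyGetD ks i 0) 0],
         p.2 + d.getD (PySem.List.pyGetD ks i 0) 0)) ([], 0) =
      ((List.range j).map (fun i => preS cnt ks i), ((ks.take j).map cnt).sum) := by
  intro j
  induction j with
  | zero => intro _; simp
  | succ j ih =>
    intro hj
    rw [show ((j + 1 : Nat) : Int) = (j : Int) + 1 by push_cast; ring,
      PySem.List.pyRange_one_succ_right (by positivity), List.foldl_append, ih (by omega)]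
    simp only [List.foldl_cons, List.foldl_nil, PySem.List.pyGetD_natCast]
    rw [hd, List.range_succ, List.map_append, ← pre0_succ cnt ks (by omega)]
    rfl

theorem values_sum_counter (land : List (List Int)) :
    ((PySem.Dict.counter (cellsS land)).values).sum = ((ksS land).map (cntS land)).sum := by
  have hnd : (PySem.Dict.counter (cellsS land)).keys.Nodup := by
    rw [PySem.Dict.keys_counter]; exact PySem.Set.nodup_ofList _
  rw [PySem.Dict.values_eq_map_keys _ hnd 0]
  have h1 : (PySem.Dict.counter (cellsS land)).keys.map
      (fun k => (PySem.Dict.counter (cellsS land)).getD k 0) =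
      (PySem.Dict.counter (cellsS land)).keys.map (cntS land) :=
    List.map_congr_left (fun k _ => PySem.Dict.getD_counter _ k)
  rw [h1]
  have hperm : (ksS land).Perm (PySem.Dict.counter (cellsS land)).keys :=
    PySem.List.sorted_perm _ _ _
  exact (List.Perm.sum_eq (hperm.map (cntS land))).symm

theorem total_split (cnt : Int → Int) (ks : List Int) (i : Nat) :
    (ks.map cnt).sum = preS cnt ks i + sufS cnt ks (i+1) := by
  unfold preS sufS
  conv_lhs => rw [← List.take_append_drop (i+1) ks]
  rw [List.map_append, List.sum_append]

theorem getD_map_range' (f : Nat → Int) {mN i : Nat} (h : i < mN) :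
    ((List.range mN).map f).getD i 0 = f i := by
  rw [List.getD_eq_getElem _ _ (by simpa using h)]
  simp

theorem rsm_fold (Q : Int) (cnt : Int → Int) (ks : List Int) (mN : Nat) (Rlist : List Int)
    (hR : ∀ i : Nat, i < mN → Rlist.getD i 0 = RvS Q cnt ks i) :
    ∀ (j : Nat), j ≤ mN → ∀ (acc : List Int) (cur : Int),
    (j = mN ∨ cur = smaxS Q cnt ks mN j) →
    (PySem.List.pyRange ((j : Int) - 1) (-1) (-1)).foldl (fun (p : List Int × Int) i =>
        (p.1 ++ [if i = (mN : Int) - 1 then PySem.List.pyGetD Rlist i 0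
                 else max (PySem.List.pyGetD Rlist i 0) p.2],
         if i = (mN : Int) - 1 then PySem.List.pyGetD Rlist i 0
         else max (PySem.List.pyGetD Rlist i 0) p.2)) (acc, cur) =
      (acc ++ ((List.range j).map (smaxS Q cnt ks mN)).reverse,
       if j = 0 then cur else smaxS Q cnt ks mN 0) := by
  intro j
  induction j with
  | zero =>
    intro _ acc cur _
    rw [PySem.List.pyRange_neg_one_eq_nil (by omega)]
    simp
  | succ j ih =>
    intro hj acc cur hcur
    rw [show ((j + 1 : Nat) : Int) - 1 = (j : Int) by push_cast; ring,
      PySem.List.pyRange_neg_one_cons (by omega : (-1 : Int) < (j : Int))]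
    simp only [List.foldl_cons, PySem.List.pyGetD_natCast]
    have hstep : (if (j : Int) = (mN : Int) - 1 then Rlist.getD j 0 else max (Rlist.getD j 0) cur)
        = smaxS Q cnt ks mN j := by
      by_cases hlast : j + 1 = mN
      · rw [if_pos (by omega), hR j (by omega), smaxS, if_neg (by omega)]
      · have hjlt : j + 1 < mN := by omega
        rw [if_neg (by omega), hR j (by omega)]
        rcases hcur with h | h
        · omega
        · rw [h]
          conv_rhs => rw [smaxS]
          rw [if_pos hjlt]
    rw [hstep, ih (by omega) (acc ++ [smaxS Q cnt ks mN j]) _ (Or.inr rfl),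
      List.range_succ, List.map_append, List.reverse_append, Prod.mk.injEq]
    have h2 : (if j = 0 then smaxS Q cnt ks mN j else smaxS Q cnt ks mN 0) = smaxS Q cnt ks mN 0 := by
      split_ifs with h
      · rw [h]
      · rfl
    exact ⟨by simp, by rw [h2]; simp⟩

theorem t_fold_keep (Llist smlist : List Int) (lst : List Int) (v : Int) :
    lst.foldl (fun (p : Int × Bool) i =>
        if p.2 then p
        else if PySem.List.pyGetD smlist i 0 ≤ PySem.List.pyGetD Llist i 0 then (i, true) else p)
      (v, true) = (v, true) := by
  induction lst with
  | nil => rfl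
  | cons a t ih => simpa using ih

theorem t_fold (P Q : Int) (cnt : Int → Int) (ks : List Int) (mN : Nat)
    (Llist smlist : List Int)
    (hL : ∀ i : Nat, i < mN → Llist.getD i 0 = LvS P cnt ks i)
    (hsm : ∀ i : Nat, i < mN → smlist.getD i 0 = smaxS Q cnt ks mN i) :
    ∀ (j : Nat), j ≤ mN →
    (PySem.List.pyRange (j : Int) (mN : Int)).foldl (fun (p : Int × Bool) i =>
        if p.2 then p
        else if PySem.List.pyGetD smlist i 0 ≤ PySem.List.pyGetD Llist i 0 then (i, true) else p)
      ((mN : Int), false) =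
      (if tIdxS P Q cnt ks j mN = mN then ((mN : Int), false)
       else ((tIdxS P Q cnt ks j mN : Int), true)) := by
  intro j
  induction hd : mN - j generalizing j with
  | zero =>
    intro hj
    have hjm : j = mN := by omega
    subst hjm
    have htt : tIdxS P Q cnt ks j j = j := by rw [tIdxS, if_neg (by omega)]
    rw [PySem.List.pyRange_one_eq_nil (le_refl _), List.foldl_nil, htt, if_pos rfl]
  | succ n ih =>
    intro hj
    have hjlt : j < mN := by omega
    rw [PySem.List.pyRange_one_cons (by exact_mod_cast hjlt)]
    simp only [List.foldl_cons, Bool.false_eq_true, if_false, PySem.List.pyGetD_natCast]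
    by_cases hcond : smlist.getD j 0 ≤ Llist.getD j 0
    · rw [if_pos hcond, t_fold_keep]
      have ht : tIdxS P Q cnt ks j mN = j := by
        rw [tIdxS, if_pos hjlt, if_pos (by rw [← hL j hjlt, ← hsm j hjlt]; exact hcond)]
      rw [ht, if_neg (by omega)]
    · rw [if_neg hcond,
        show (j : Int) + 1 = ((j + 1 : Nat) : Int) by push_cast; ring,
        ih (j+1) (by omega) (by omega)]
      have ht : tIdxS P Q cnt ks j mN = tIdxS P Q cnt ks (j+1) mN := by
        rw [tIdxS, if_pos hjlt, if_neg (by rw [← hL j hjlt, ← hsm j hjlt]; exact hcond)]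
      rw [ht]


theorem hLmap' (land : List (List Int)) (P Q : Int) :
    List.map (fun b => P * b)
      (List.map (fun i => preS (cntS land) (ksS land) i) (List.range ((ksS land).length - 1))) =
    (List.range ((ksS land).length - 1)).map (LvS P (cntS land) (ksS land)) := by
  rw [List.map_map]; rfl

theorem hRmap' (land : List (List Int)) (P Q : Int) :
    List.map (fun b => Q * ((List.map (cntS land) (ksS land)).sum - b))
      (List.map (fun i => preS (cntS land) (ksS land) i) (List.range ((ksS land).length - 1))) =
    (List.range ((ksS land).length - 1)).map (RvS Q (cntS land) (ksS land)) := by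
  rw [List.map_map]
  refine List.map_congr_left (fun i hi => ?_)
  show Q * ((List.map (cntS land) (ksS land)).sum - preS (cntS land) (ksS land) i) = _
  rw [total_split (cntS land) (ksS land) i]
  unfold RvS
  ring

theorem proj_t (land : List (List Int)) (P Q : Int) :
    (if tIdxS P Q (cntS land) (ksS land) 0 ((ksS land).length - 1) = (ksS land).length - 1
     then ((((ksS land).length - 1 : Nat) : Int), false)
     else (((tIdxS P Q (cntS land) (ksS land) 0 ((ksS land).length - 1) : Nat) : Int), true)).1 =
    ((tIdxS P Q (cntS land) (ksS land) 0 ((ksS land).length - 1) : Nat) : Int) := by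
  split_ifs with h
  · rw [h]
  · rfl

theorem ans_fold (P Q : Int) (cnt : Int → Int) (ks : List Int) (mN tN : Nat)
    (Llist Rlist : List Int)
    (hL : ∀ i : Nat, i < mN → Llist.getD i 0 = LvS P cnt ks i)
    (hR : ∀ i : Nat, i < mN → Rlist.getD i 0 = RvS Q cnt ks i) :
    ∀ (j : Nat), j ≤ mN →
    (PySem.List.pyRange 0 (j : Int)).foldl (fun ans i =>
        ans + (PySem.List.pyGetD ks (i+1) 0 - PySem.List.pyGetD ks i 0) *
          (if i < ((tN : Nat) : Int) then PySem.List.pyGetD Llist i 0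
           else PySem.List.pyGetD Rlist i 0)) 0 =
      ((List.range j).map (fun i =>
        gapS ks i * (if i < tN then LvS P cnt ks i else RvS Q cnt ks i))).sum := by
  intro j
  induction j with
  | zero => intro _; simp
  | succ j ih =>
    intro hj
    rw [show ((j + 1 : Nat) : Int) = (j : Int) + 1 by push_cast; ring,
      PySem.List.pyRange_one_succ_right (by positivity), List.foldl_append, ih (by omega)]
    simp only [List.foldl_cons, List.foldl_nil]
    rw [show (j : Int) + 1 = ((j + 1 : Nat) : Int) by push_cast; ring]
    simp only [PySem.List.pyGetD_natCast]
    rw [List.range_succ, List.map_append, List.sum_append]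
    have hcond : ((j : Int) < ((tN : Nat) : Int)) = (j < tN) := by
      simp [Nat.cast_lt]
    have hbody : (ks.getD (j+1) 0 - ks.getD j 0) *
        (if (j : Int) < ((tN : Nat) : Int) then Llist.getD j 0 else Rlist.getD j 0) =
        gapS ks j * (if j < tN then LvS P cnt ks j else RvS Q cnt ks j) := by
      by_cases hjt : j < tN
      · rw [if_pos (by exact_mod_cast hjt), if_pos hjt, hL j (by omega)]
        rfl
      · rw [if_neg (by exact_mod_cast hjt), if_neg hjt, hR j (by omega)]
        rfl
    rw [hbody]
    simp

theorem alt_eq_WS (land : List (List Int)) (P Q : Int)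
    (hne : land ≠ []) (hrows : ∀ row ∈ land, land.length ≤ row.length) :
    solution_alt land P Q =
      WS P Q (cntS land) (ksS land) 0 ((ksS land).length - 1) := by
  have hK : 1 ≤ (ksS land).length := List.length_pos_of_ne_nil (ksS_ne_nil land hne hrows)
  unfold solution_alt
  simp only []
  rw [buildB_eq_counter land hrows,
    show PySem.List.sorted (PySem.Dict.counter (cellsS land)).keys (fun x => x) = ksS land from rfl]
  have hcast : PySem.List.len (ksS land) - 1 = (((ksS land).length - 1 : Nat) : Int) := by
    rw [PySem.List.len_eq]; push_cast [hK]; ring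
  rw [hcast, values_sum_counter land,
    below_fold (cntS land) (ksS land) (PySem.Dict.counter (cellsS land))
      (fun v => PySem.Dict.getD_counter _ v) ((ksS land).length - 1) (by omega)]
  dsimp only
  rw [hLmap' land P Q, hRmap' land P Q,
    rsm_fold Q (cntS land) (ksS land) ((ksS land).length - 1) _
      (fun i hi => getD_map_range' _ hi) ((ksS land).length - 1) (le_refl _) [] 0 (Or.inl rfl)]
  dsimp only
  rw [List.nil_append, List.reverse_reverse]
  have htf := t_fold P Q (cntS land) (ksS land) ((ksS land).length - 1) _ _
      (fun i hi => getD_map_range' (LvS P (cntS land) (ksS land)) hi)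
      (fun i hi => getD_map_range' (smaxS Q (cntS land) (ksS land) ((ksS land).length - 1)) hi)
      0 (by omega)
  rw [Nat.cast_zero] at htf
  rw [htf, proj_t land P Q]
  rw [ans_fold P Q (cntS land) (ksS land) ((ksS land).length - 1) _ _ _
      (fun i hi => getD_map_range' _ hi) (fun i hi => getD_map_range' _ hi)
      ((ksS land).length - 1) (le_refl _)]
  unfold WS
  rw [Nat.sub_zero, ← List.range_eq_range']

theorem solution_eq_alt (land : List (List Int)) (P Q : Int)
    (hpre : Pre_solution land P Q) : solution land P Q = solution_alt land P Q := by
  obtain ⟨hne, hrows⟩ := hpre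
  have hK : 1 ≤ (ksS land).length := List.length_pos_of_ne_nil (ksS_ne_nil land hne hrows)
  rw [solution_eq_GS land P Q hne hrows, alt_eq_WS land P Q hne hrows]
  exact GS_eq_WS P Q (cntS land) (ksS land) (cntS_pos land) (by omega) (by omega)

-- ===== VERDICT (by name: the statement is the Claim_ definition above) =====
theorem solution_spec : Claim_equal_solution := by
  intro land P Q _ hpre
  unfold Spec_solution
  exact solution_eq_alt land P Q hpre
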